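-- pv_equiv track=rewrite | github.com/encgoo/hackerrank | Implementation/queens_attack.py | count_diagonal
-- ===== SOURCE A (Python) =====
-- def count_diagonal(n, r_q, c_q, obstacles):
--     cn = 0
--     # along x = y
--     os1 = [obs for obs in obstacles if obs[0] - r_q == obs[1] - c_q]
--     pos = [r_q + 1, c_q + 1]
--     while pos[0] <= n and pos[1] <= n and pos not in os1:
--         cn += 1
--         pos[0] += 1
--         pos[1] += 1
--     pos = [r_q - 1, c_q - 1]
--     while pos[0] > 0 and pos[1] > 0 and pos not in os1:
--         cn += 1
--         pos[0] -= 1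
--         pos[1] -= 1
--
--     os2 = [obs for obs in obstacles if obs[0] + obs[1] == r_q + c_q]
--     pos = [r_q + 1, c_q - 1]
--     while pos[0] <= n and pos[1] > 0 and pos not in os2:
--         cn += 1
--         pos[0] += 1
--         pos[1] -= 1
--     pos = [r_q - 1, c_q + 1]
--     while pos[0] > 0 and pos[1] <= n and pos not in os2:
--         cn += 1
--         pos[0] -= 1
--         pos[1] += 1
--
--     return cn
-- ===== SOURCE B (Python) =====
-- def count_diagonal(n, r_q, c_q, obstacles):
--     # O(k): per diagonal direction, distance to the board edge, shortened by the
--     # nearest obstacle on that ray found in a single scan of the obstacle list.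
--     total = 0
--     for dr, dc, edge in ((1, 1, min(n - r_q, n - c_q)),
--                          (-1, -1, min(r_q - 1, c_q - 1)),
--                          (1, -1, min(n - r_q, c_q - 1)),
--                          (-1, 1, min(r_q - 1, n - c_q))):
--         reach = max(0, edge)
--         for obs in obstacles:
--             if len(obs) == 2:
--                 t = (obs[0] - r_q) * dr
--                 if t >= 1 and (obs[1] - c_q) * dc == t:
--                     reach = min(reach, t - 1)
--         total += reach
--     return total
-- ===== Notes on version B (the rewrite author's own statement) =====
-- stated objective: faster
-- what changed: A walks every diagonal square one step at a time (each step scanning the filtered obstacle list); B computes, per diagonal direction, the distance to the board edge in closed form and finds the nearest blocking obstacle in a single scan of the obstacle list, so the answer is pure distance arithmetic.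
import Mathlib
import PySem

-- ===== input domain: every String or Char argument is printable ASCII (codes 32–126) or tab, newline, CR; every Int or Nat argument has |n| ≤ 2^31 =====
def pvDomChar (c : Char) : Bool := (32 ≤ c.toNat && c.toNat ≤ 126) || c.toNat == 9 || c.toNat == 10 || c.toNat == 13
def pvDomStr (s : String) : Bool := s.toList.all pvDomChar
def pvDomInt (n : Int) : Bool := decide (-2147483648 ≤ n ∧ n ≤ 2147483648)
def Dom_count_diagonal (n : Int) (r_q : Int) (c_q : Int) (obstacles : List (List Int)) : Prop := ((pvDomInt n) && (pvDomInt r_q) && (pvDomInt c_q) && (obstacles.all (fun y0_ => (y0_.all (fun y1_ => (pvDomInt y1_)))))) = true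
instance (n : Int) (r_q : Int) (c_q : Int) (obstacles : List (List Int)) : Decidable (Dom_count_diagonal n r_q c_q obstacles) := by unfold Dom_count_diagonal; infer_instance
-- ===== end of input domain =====

-- B replaces A's four step-by-step diagonal walks (O(n) steps each, with a list scan per step)
-- by per-direction distance arithmetic: edge distance plus one scan of the obstacle list per
-- direction for the nearest blocker (objective: faster, asymptotic).

-- ===== PORT A =====
-- the four while-loops of A, one helper each (state = pos, literally stepped)
def loopUR (n : Int) (os : List (List Int)) (p0 p1 cn : Int) : Int :=
  if p0 ≤ n ∧ p1 ≤ n ∧ [p0, p1] ∉ os then loopUR n os (p0 + 1) (p1 + 1) (cn + 1) else cn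
termination_by (n + 1 - p0).toNat
decreasing_by omega

def loopDL (os : List (List Int)) (p0 p1 cn : Int) : Int :=
  if 0 < p0 ∧ 0 < p1 ∧ [p0, p1] ∉ os then loopDL os (p0 - 1) (p1 - 1) (cn + 1) else cn
termination_by p0.toNat
decreasing_by omega

def loopUL (n : Int) (os : List (List Int)) (p0 p1 cn : Int) : Int :=
  if p0 ≤ n ∧ 0 < p1 ∧ [p0, p1] ∉ os then loopUL n os (p0 + 1) (p1 - 1) (cn + 1) else cn
termination_by p1.toNat
decreasing_by omega

def loopDR (n : Int) (os : List (List Int)) (p0 p1 cn : Int) : Int :=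
  if 0 < p0 ∧ p1 ≤ n ∧ [p0, p1] ∉ os then loopDR n os (p0 - 1) (p1 + 1) (cn + 1) else cn
termination_by p0.toNat
decreasing_by omega

def count_diagonal (n : Int) (r_q : Int) (c_q : Int) (obstacles : List (List Int)) : Int :=
  let os1 := obstacles.filter (fun obs =>
    PySem.List.pyGetD obs 0 0 - r_q == PySem.List.pyGetD obs 1 0 - c_q)
  let os2 := obstacles.filter (fun obs =>
    PySem.List.pyGetD obs 0 0 + PySem.List.pyGetD obs 1 0 == r_q + c_q)
  let cn1 := loopUR n os1 (r_q + 1) (c_q + 1) 0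
  let cn2 := loopDL os1 (r_q - 1) (c_q - 1) cn1
  let cn3 := loopUL n os2 (r_q + 1) (c_q - 1) cn2
  loopDR n os2 (r_q - 1) (c_q + 1) cn3

-- ===== PORT B =====
-- one scan of the obstacles per direction: reach = min(edge distance, nearest blocker - 1)
def dirReach (r_q c_q : Int) (obstacles : List (List Int)) (dr dc edge : Int) : Int :=
  obstacles.foldl (fun reach obs =>
    if obs.length = 2 then
      let t := (PySem.List.pyGetD obs 0 0 - r_q) * dr
      if 1 ≤ t ∧ (PySem.List.pyGetD obs 1 0 - c_q) * dc = t then min reach (t - 1) else reach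
    else reach) (max 0 edge)

def count_diagonal_alt (n : Int) (r_q : Int) (c_q : Int) (obstacles : List (List Int)) : Int :=
  dirReach r_q c_q obstacles 1 1 (min (n - r_q) (n - c_q))
    + dirReach r_q c_q obstacles (-1) (-1) (min (r_q - 1) (c_q - 1))
    + dirReach r_q c_q obstacles 1 (-1) (min (n - r_q) (c_q - 1))
    + dirReach r_q c_q obstacles (-1) 1 (min (r_q - 1) (n - c_q))

-- ===== PRECONDITION & SPEC =====
-- Pre_ excludes obstacle lists containing an entry of length < 2: there Python A raises IndexError (obs[0]/obs[1]).
def Pre_count_diagonal (n : Int) (r_q : Int) (c_q : Int) (obstacles : List (List Int)) : Prop :=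
  ∀ obs ∈ obstacles, 2 ≤ obs.length
instance (n : Int) (r_q : Int) (c_q : Int) (obstacles : List (List Int)) : Decidable (Pre_count_diagonal n r_q c_q obstacles) := by unfold Pre_count_diagonal; infer_instance

def pvWitness_count_diagonal : Int × Int × Int × List (List Int) := (8, 4, 4, [[3, 5]])

def Spec_count_diagonal (n : Int) (r_q : Int) (c_q : Int) (obstacles : List (List Int)) (out : Int) : Prop := out = count_diagonal_alt n r_q c_q obstacles
instance (n : Int) (r_q : Int) (c_q : Int) (obstacles : List (List Int)) (out : Int) : Decidable (Spec_count_diagonal n r_q c_q obstacles out) := by unfold Spec_count_diagonal; infer_instance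

-- ===== CLAIM (what is proved, stated in full; the proofs are below) =====
def Claim_equal_count_diagonal : Prop := ∀ (n : Int) (r_q : Int) (c_q : Int) (obstacles : List (List Int)), Dom_count_diagonal n r_q c_q obstacles → Pre_count_diagonal n r_q c_q obstacles → Spec_count_diagonal n r_q c_q obstacles (count_diagonal n r_q c_q obstacles)

-- ===== LEMMAS AND PROOFS =====
-- helper defs for the proofs
def bC (rq cq dr dc : Int) (obs : List Int) : Prop :=
  obs.length = 2 ∧ 1 ≤ (PySem.List.pyGetD obs 0 0 - rq) * dr ∧
    (PySem.List.pyGetD obs 1 0 - cq) * dc = (PySem.List.pyGetD obs 0 0 - rq) * dr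

def bT (rq dr : Int) (obs : List Int) : Int := (PySem.List.pyGetD obs 0 0 - rq) * dr

lemma pg0 (x y d : Int) : PySem.List.pyGetD [x, y] 0 d = x := by
  simp [PySem.List.pyGetD]

lemma pg1 (x y d : Int) : PySem.List.pyGetD [x, y] 1 d = y := by
  simp [PySem.List.pyGetD]

lemma fold_spec (rq cq dr dc : Int) (os : List (List Int)) :
    ∀ (r0 R : Int),
      os.foldl (fun reach obs =>
        if obs.length = 2 then
          let t := (PySem.List.pyGetD obs 0 0 - rq) * dr
          if 1 ≤ t ∧ (PySem.List.pyGetD obs 1 0 - cq) * dc = t then min reach (t - 1) else reach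
        else reach) r0 = R →
      R ≤ r0 ∧ (∀ obs ∈ os, bC rq cq dr dc obs → R ≤ bT rq dr obs - 1) ∧
        (R = r0 ∨ ∃ obs ∈ os, bC rq cq dr dc obs ∧ R = bT rq dr obs - 1) := by
  induction os with
  | nil => intro r0 R hR; simp at hR; subst hR; simp
  | cons a os ih =>
    intro r0 R hR
    simp only [List.foldl_cons] at hR
    by_cases hca : bC rq cq dr dc a
    · obtain ⟨h2, hc1, hc2⟩ := hca
      rw [if_pos h2] at hR
      rw [if_pos ⟨hc1, hc2⟩] at hR
      have hca : bC rq cq dr dc a := ⟨h2, hc1, hc2⟩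
      have hbtEq : (PySem.List.pyGetD a 0 0 - rq) * dr = bT rq dr a := rfl
      rw [hbtEq] at hR
      obtain ⟨h1, h2, h3⟩ := ih (min r0 (bT rq dr a - 1)) R hR
      refine ⟨by omega, ?_, ?_⟩
      · intro obs hm hc
        rcases List.mem_cons.mp hm with h | h
        · subst h; omega
        · exact h2 obs h hc
      · rcases h3 with h | ⟨obs, hm, hc, he⟩
        · rcases le_total r0 (bT rq dr a - 1) with hle | hlt
          · left; omega
          · right; exact ⟨a, List.mem_cons_self .., hca, by omega⟩
        · right; exact ⟨obs, List.mem_cons_of_mem _ hm, hc, he⟩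
    · have hR' : os.foldl (fun reach obs =>
          if obs.length = 2 then
            let t := (PySem.List.pyGetD obs 0 0 - rq) * dr
            if 1 ≤ t ∧ (PySem.List.pyGetD obs 1 0 - cq) * dc = t then min reach (t - 1) else reach
          else reach) r0 = R := by
        by_cases h2 : a.length = 2
        · rw [if_pos h2] at hR
          rw [if_neg (fun hc => hca ⟨h2, hc.1, hc.2⟩)] at hR
          exact hR
        · rw [if_neg h2] at hR
          exact hR
      obtain ⟨h1, h2, h3⟩ := ih r0 R hR'
      refine ⟨h1, ?_, ?_⟩
      · intro obs hm hc
        rcases List.mem_cons.mp hm with h | h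
        · subst h; exact absurd hc hca
        · exact h2 obs h hc
      · rcases h3 with h | ⟨obs, hm, hc, he⟩
        · exact Or.inl h
        · exact Or.inr ⟨obs, List.mem_cons_of_mem _ hm, hc, he⟩

lemma loopUR_eq (n : Int) (os : List (List Int)) :
    ∀ (k : Nat) (p0 p1 K : Int), K.toNat = k → 0 ≤ K →
      (∀ j : Int, 0 ≤ j → j < K → (p0 + j ≤ n ∧ p1 + j ≤ n ∧ [p0 + j, p1 + j] ∉ os)) →
      ¬(p0 + K ≤ n ∧ p1 + K ≤ n ∧ [p0 + K, p1 + K] ∉ os) →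
      ∀ cn : Int, loopUR n os p0 p1 cn = cn + K := by
  intro k
  induction k with
  | zero =>
    intro p0 p1 K hk hK hok hbad cn
    have hK0 : K = 0 := by omega
    subst hK0
    simp only [add_zero] at hbad
    rw [loopUR, if_neg hbad]
    omega
  | succ k ih =>
    intro p0 p1 K hk hK hok hbad cn
    have h0 := hok 0 le_rfl (by omega)
    simp only [add_zero] at h0
    rw [loopUR, if_pos h0]
    have hrec : loopUR n os (p0 + 1) (p1 + 1) (cn + 1) = (cn + 1) + (K - 1) := by
      apply ih (p0 + 1) (p1 + 1) (K - 1) (by omega) (by omega)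
      · intro j hj hjK
        have h := hok (j + 1) (by omega) (by omega)
        have e0 : p0 + (j + 1) = p0 + 1 + j := by ring
        have e1 : p1 + (j + 1) = p1 + 1 + j := by ring
        rw [e0, e1] at h
        exact h
      · have e0 : p0 + K = p0 + 1 + (K - 1) := by ring
        have e1 : p1 + K = p1 + 1 + (K - 1) := by ring
        rw [e0, e1] at hbad
        exact hbad
    omega

lemma bridge_UR (n rq cq c : Int) (obstacles : List (List Int)) :
    loopUR n (obstacles.filter (fun obs =>
        PySem.List.pyGetD obs 0 0 - rq == PySem.List.pyGetD obs 1 0 - cq)) (rq + 1) (cq + 1) c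
      = c + dirReach rq cq obstacles 1 1 (min (n - rq) (n - cq)) := by
  unfold dirReach
  set e := min (n - rq) (n - cq) with he
  set R := obstacles.foldl (fun reach obs =>
    if obs.length = 2 then
      let t := (PySem.List.pyGetD obs 0 0 - rq) * 1
      if 1 ≤ t ∧ (PySem.List.pyGetD obs 1 0 - cq) * 1 = t then min reach (t - 1) else reach
    else reach) (max 0 e) with hR
  obtain ⟨hle, hub, hat⟩ := fold_spec rq cq 1 1 obstacles (max 0 e) R hR.symm
  have hR0 : 0 ≤ R := by
    rcases hat with h | ⟨obs, _, hc, hEq⟩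
    · omega
    · have := hc.2.1; unfold bT at hEq; omega
  apply loopUR_eq n _ R.toNat _ _ R rfl hR0
  · intro j hj hjR
    refine ⟨by omega, by omega, ?_⟩
    intro hmem
    obtain ⟨hmo, hcond⟩ := List.mem_filter.mp hmem
    have hcb : bC rq cq 1 1 ([rq + 1 + j, cq + 1 + j] : List Int) := by
      refine ⟨rfl, ?_, ?_⟩ <;> simp only [pg0, pg1] <;> ring_nf <;> omega
    have := hub _ hmo hcb
    unfold bT at this
    simp only [pg0] at this
    omega
  · intro hcond
    rcases hat with h | ⟨obs, hmo, hc, hEq⟩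
    · omega
    · obtain ⟨hlen, ht1, ht2⟩ := hc
      obtain ⟨a, b, rfl⟩ := List.length_eq_two.mp hlen
      unfold bT at hEq
      simp only [pg0, pg1] at ht1 ht2 hEq
      apply hcond.2.2
      have hEqL : ([rq + 1 + R, cq + 1 + R] : List Int) = [a, b] := by
        have : rq + 1 + R = a := by omega
        have : cq + 1 + R = b := by omega
        simp_all
      rw [hEqL]
      refine List.mem_filter.mpr ⟨hmo, ?_⟩
      simp only [pg0, pg1, beq_iff_eq]
      omega

lemma loopDL_eq (os : List (List Int)) :
    ∀ (k : Nat) (p0 p1 K : Int), K.toNat = k → 0 ≤ K →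
      (∀ j : Int, 0 ≤ j → j < K → (0 < p0 - j ∧ 0 < p1 - j ∧ [p0 - j, p1 - j] ∉ os)) →
      ¬(0 < p0 - K ∧ 0 < p1 - K ∧ [p0 - K, p1 - K] ∉ os) →
      ∀ cn : Int, loopDL os p0 p1 cn = cn + K := by
  intro k
  induction k with
  | zero =>
    intro p0 p1 K hk hK hok hbad cn
    have hK0 : K = 0 := by omega
    subst hK0
    simp only [sub_zero] at hbad
    rw [loopDL, if_neg hbad]
    omega
  | succ k ih =>
    intro p0 p1 K hk hK hok hbad cn
    have h0 := hok 0 le_rfl (by omega)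
    simp only [sub_zero] at h0
    rw [loopDL, if_pos h0]
    have hrec : loopDL os (p0 - 1) (p1 - 1) (cn + 1) = (cn + 1) + (K - 1) := by
      apply ih (p0 - 1) (p1 - 1) (K - 1) (by omega) (by omega)
      · intro j hj hjK
        have h := hok (j + 1) (by omega) (by omega)
        have e0 : p0 - (j + 1) = p0 - 1 - j := by ring
        have e1 : p1 - (j + 1) = p1 - 1 - j := by ring
        rw [e0, e1] at h
        exact h
      · have e0 : p0 - K = p0 - 1 - (K - 1) := by ring
        have e1 : p1 - K = p1 - 1 - (K - 1) := by ring
        rw [e0, e1] at hbad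
        exact hbad
    omega

lemma loopUL_eq (n : Int) (os : List (List Int)) :
    ∀ (k : Nat) (p0 p1 K : Int), K.toNat = k → 0 ≤ K →
      (∀ j : Int, 0 ≤ j → j < K → (p0 + j ≤ n ∧ 0 < p1 - j ∧ [p0 + j, p1 - j] ∉ os)) →
      ¬(p0 + K ≤ n ∧ 0 < p1 - K ∧ [p0 + K, p1 - K] ∉ os) →
      ∀ cn : Int, loopUL n os p0 p1 cn = cn + K := by
  intro k
  induction k with
  | zero =>
    intro p0 p1 K hk hK hok hbad cn
    have hK0 : K = 0 := by omega
    subst hK0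
    simp only [add_zero, sub_zero] at hbad
    rw [loopUL, if_neg hbad]
    omega
  | succ k ih =>
    intro p0 p1 K hk hK hok hbad cn
    have h0 := hok 0 le_rfl (by omega)
    simp only [add_zero, sub_zero] at h0
    rw [loopUL, if_pos h0]
    have hrec : loopUL n os (p0 + 1) (p1 - 1) (cn + 1) = (cn + 1) + (K - 1) := by
      apply ih (p0 + 1) (p1 - 1) (K - 1) (by omega) (by omega)
      · intro j hj hjK
        have h := hok (j + 1) (by omega) (by omega)
        have e0 : p0 + (j + 1) = p0 + 1 + j := by ring
        have e1 : p1 - (j + 1) = p1 - 1 - j := by ring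
        rw [e0, e1] at h
        exact h
      · have e0 : p0 + K = p0 + 1 + (K - 1) := by ring
        have e1 : p1 - K = p1 - 1 - (K - 1) := by ring
        rw [e0, e1] at hbad
        exact hbad
    omega

lemma loopDR_eq (n : Int) (os : List (List Int)) :
    ∀ (k : Nat) (p0 p1 K : Int), K.toNat = k → 0 ≤ K →
      (∀ j : Int, 0 ≤ j → j < K → (0 < p0 - j ∧ p1 + j ≤ n ∧ [p0 - j, p1 + j] ∉ os)) →
      ¬(0 < p0 - K ∧ p1 + K ≤ n ∧ [p0 - K, p1 + K] ∉ os) →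
      ∀ cn : Int, loopDR n os p0 p1 cn = cn + K := by
  intro k
  induction k with
  | zero =>
    intro p0 p1 K hk hK hok hbad cn
    have hK0 : K = 0 := by omega
    subst hK0
    simp only [add_zero, sub_zero] at hbad
    rw [loopDR, if_neg hbad]
    omega
  | succ k ih =>
    intro p0 p1 K hk hK hok hbad cn
    have h0 := hok 0 le_rfl (by omega)
    simp only [add_zero, sub_zero] at h0
    rw [loopDR, if_pos h0]
    have hrec : loopDR n os (p0 - 1) (p1 + 1) (cn + 1) = (cn + 1) + (K - 1) := by
      apply ih (p0 - 1) (p1 + 1) (K - 1) (by omega) (by omega)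
      · intro j hj hjK
        have h := hok (j + 1) (by omega) (by omega)
        have e0 : p0 - (j + 1) = p0 - 1 - j := by ring
        have e1 : p1 + (j + 1) = p1 + 1 + j := by ring
        rw [e0, e1] at h
        exact h
      · have e0 : p0 - K = p0 - 1 - (K - 1) := by ring
        have e1 : p1 + K = p1 + 1 + (K - 1) := by ring
        rw [e0, e1] at hbad
        exact hbad
    omega

lemma bridge_DL (rq cq c : Int) (obstacles : List (List Int)) :
    loopDL (obstacles.filter (fun obs =>
        PySem.List.pyGetD obs 0 0 - rq == PySem.List.pyGetD obs 1 0 - cq)) (rq - 1) (cq - 1) c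
      = c + dirReach rq cq obstacles (-1) (-1) (min (rq - 1) (cq - 1)) := by
  unfold dirReach
  set e := min (rq - 1) (cq - 1) with he
  set R := obstacles.foldl (fun reach obs =>
    if obs.length = 2 then
      let t := (PySem.List.pyGetD obs 0 0 - rq) * (-1)
      if 1 ≤ t ∧ (PySem.List.pyGetD obs 1 0 - cq) * (-1) = t then min reach (t - 1) else reach
    else reach) (max 0 e) with hR
  obtain ⟨hle, hub, hat⟩ := fold_spec rq cq (-1) (-1) obstacles (max 0 e) R hR.symm
  have hR0 : 0 ≤ R := by
    rcases hat with h | ⟨obs, _, hc, hEq⟩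
    · omega
    · have := hc.2.1; unfold bT at hEq; omega
  apply loopDL_eq _ R.toNat _ _ R rfl hR0
  · intro j hj hjR
    refine ⟨by omega, by omega, ?_⟩
    intro hmem
    obtain ⟨hmo, hcond⟩ := List.mem_filter.mp hmem
    have hcb : bC rq cq (-1) (-1) ([rq - 1 - j, cq - 1 - j] : List Int) := by
      refine ⟨rfl, ?_, ?_⟩ <;> simp only [pg0, pg1] <;> ring_nf <;> omega
    have := hub _ hmo hcb
    unfold bT at this
    simp only [pg0] at this
    omega
  · intro hcond
    rcases hat with h | ⟨obs, hmo, hc, hEq⟩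
    · omega
    · obtain ⟨hlen, ht1, ht2⟩ := hc
      obtain ⟨a, b, rfl⟩ := List.length_eq_two.mp hlen
      unfold bT at hEq
      simp only [pg0, pg1] at ht1 ht2 hEq
      apply hcond.2.2
      have hEqL : ([rq - 1 - R, cq - 1 - R] : List Int) = [a, b] := by
        have h1 : rq - 1 - R = a := by omega
        have h2 : cq - 1 - R = b := by omega
        rw [h1, h2]
      rw [hEqL]
      refine List.mem_filter.mpr ⟨hmo, ?_⟩
      simp only [pg0, pg1, beq_iff_eq]
      omega

lemma bridge_UL (n rq cq c : Int) (obstacles : List (List Int)) :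
    loopUL n (obstacles.filter (fun obs =>
        PySem.List.pyGetD obs 0 0 + PySem.List.pyGetD obs 1 0 == rq + cq)) (rq + 1) (cq - 1) c
      = c + dirReach rq cq obstacles 1 (-1) (min (n - rq) (cq - 1)) := by
  unfold dirReach
  set e := min (n - rq) (cq - 1) with he
  set R := obstacles.foldl (fun reach obs =>
    if obs.length = 2 then
      let t := (PySem.List.pyGetD obs 0 0 - rq) * 1
      if 1 ≤ t ∧ (PySem.List.pyGetD obs 1 0 - cq) * (-1) = t then min reach (t - 1) else reach
    else reach) (max 0 e) with hR
  obtain ⟨hle, hub, hat⟩ := fold_spec rq cq 1 (-1) obstacles (max 0 e) R hR.symm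
  have hR0 : 0 ≤ R := by
    rcases hat with h | ⟨obs, _, hc, hEq⟩
    · omega
    · have := hc.2.1; unfold bT at hEq; omega
  apply loopUL_eq n _ R.toNat _ _ R rfl hR0
  · intro j hj hjR
    refine ⟨by omega, by omega, ?_⟩
    intro hmem
    obtain ⟨hmo, hcond⟩ := List.mem_filter.mp hmem
    have hcb : bC rq cq 1 (-1) ([rq + 1 + j, cq - 1 - j] : List Int) := by
      refine ⟨rfl, ?_, ?_⟩ <;> simp only [pg0, pg1] <;> ring_nf <;> omega
    have := hub _ hmo hcb
    unfold bT at this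
    simp only [pg0] at this
    omega
  · intro hcond
    rcases hat with h | ⟨obs, hmo, hc, hEq⟩
    · omega
    · obtain ⟨hlen, ht1, ht2⟩ := hc
      obtain ⟨a, b, rfl⟩ := List.length_eq_two.mp hlen
      unfold bT at hEq
      simp only [pg0, pg1] at ht1 ht2 hEq
      apply hcond.2.2
      have hEqL : ([rq + 1 + R, cq - 1 - R] : List Int) = [a, b] := by
        have h1 : rq + 1 + R = a := by omega
        have h2 : cq - 1 - R = b := by omega
        rw [h1, h2]
      rw [hEqL]
      refine List.mem_filter.mpr ⟨hmo, ?_⟩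
      simp only [pg0, pg1, beq_iff_eq]
      omega

lemma bridge_DR (n rq cq c : Int) (obstacles : List (List Int)) :
    loopDR n (obstacles.filter (fun obs =>
        PySem.List.pyGetD obs 0 0 + PySem.List.pyGetD obs 1 0 == rq + cq)) (rq - 1) (cq + 1) c
      = c + dirReach rq cq obstacles (-1) 1 (min (rq - 1) (n - cq)) := by
  unfold dirReach
  set e := min (rq - 1) (n - cq) with he
  set R := obstacles.foldl (fun reach obs =>
    if obs.length = 2 then
      let t := (PySem.List.pyGetD obs 0 0 - rq) * (-1)
      if 1 ≤ t ∧ (PySem.List.pyGetD obs 1 0 - cq) * 1 = t then min reach (t - 1) else reach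
    else reach) (max 0 e) with hR
  obtain ⟨hle, hub, hat⟩ := fold_spec rq cq (-1) 1 obstacles (max 0 e) R hR.symm
  have hR0 : 0 ≤ R := by
    rcases hat with h | ⟨obs, _, hc, hEq⟩
    · omega
    · have := hc.2.1; unfold bT at hEq; omega
  apply loopDR_eq n _ R.toNat _ _ R rfl hR0
  · intro j hj hjR
    refine ⟨by omega, by omega, ?_⟩
    intro hmem
    obtain ⟨hmo, hcond⟩ := List.mem_filter.mp hmem
    have hcb : bC rq cq (-1) 1 ([rq - 1 - j, cq + 1 + j] : List Int) := by
      refine ⟨rfl, ?_, ?_⟩ <;> simp only [pg0, pg1] <;> ring_nf <;> omega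
    have := hub _ hmo hcb
    unfold bT at this
    simp only [pg0] at this
    omega
  · intro hcond
    rcases hat with h | ⟨obs, hmo, hc, hEq⟩
    · omega
    · obtain ⟨hlen, ht1, ht2⟩ := hc
      obtain ⟨a, b, rfl⟩ := List.length_eq_two.mp hlen
      unfold bT at hEq
      simp only [pg0, pg1] at ht1 ht2 hEq
      apply hcond.2.2
      have hEqL : ([rq - 1 - R, cq + 1 + R] : List Int) = [a, b] := by
        have h1 : rq - 1 - R = a := by omega
        have h2 : cq + 1 + R = b := by omega
        rw [h1, h2]
      rw [hEqL]
      refine List.mem_filter.mpr ⟨hmo, ?_⟩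
      simp only [pg0, pg1, beq_iff_eq]
      omega

-- ===== VERDICT (by name: the statement is the Claim_ definition above) =====
theorem count_diagonal_spec : Claim_equal_count_diagonal := by
  intro n rq cq obstacles _ _
  unfold Spec_count_diagonal count_diagonal count_diagonal_alt
  simp only []
  rw [bridge_UR, bridge_DL, bridge_UL, bridge_DR]
  omega
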